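-- pv_equiv track=rewrite | github.com/changhwanjoe/PS_daily | prg_햄버거만들기.py | solution
-- ===== SOURCE A (Python) =====
-- from collections import deque
--
-- def solution(ingredient): # 내 답안.
--     answer = 0
--     prev = 0
--     d = deque()
--     for elm in ingredient:
--         if elm ==1 :
--             if len(d)==0:
--                 d.append(elm)
--             else: # 데크 스택에 뭔가 있는경우
--                 if d[-1]== 3:
--                     for _ in range(3):
--                         d.pop()
--                     answer+=1
--                 else: d.append(elm)
--         else: # 2 or 3인경우
--             if len(d) == 0:
--                 continue
--             elif elm ==2 :
--                 if d[-1]== 1: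
--                     d.append(elm)
--                 else : #2 or 3
--                     d = deque() # clear stack
--             elif elm ==3 :
--                 if d[-1] == 2:
--                     d.append(elm)
--                 else : d = deque() # clear stack
--     return answer
-- ===== SOURCE B (Python) =====
-- def solution(ingredient):
--     # Canonical stack reduction: push each ingredient (values other than 1,2,3
--     # are not valid ingredients and are skipped, as in the original), and pop a
--     # burger whenever the top four elements read [1, 2, 3, 1].
--     stack = []
--     count = 0
--     for x in ingredient:
--         if x in (1, 2, 3):
--             stack.append(x)
--             if stack[-4:] == [1, 2, 3, 1]:
--                 del stack[-4:]
--                 count += 1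
--     return count
-- ===== Notes on version B (the rewrite author's own statement) =====
-- stated objective: simpler
-- what changed: Replaces A's per-element state machine (selective pushes, whole-stack clears on mismatch, manual triple pop) by the canonical stack reduction: push each valid ingredient and pop a burger whenever the top four elements read [1,2,3,1].
import Mathlib
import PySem

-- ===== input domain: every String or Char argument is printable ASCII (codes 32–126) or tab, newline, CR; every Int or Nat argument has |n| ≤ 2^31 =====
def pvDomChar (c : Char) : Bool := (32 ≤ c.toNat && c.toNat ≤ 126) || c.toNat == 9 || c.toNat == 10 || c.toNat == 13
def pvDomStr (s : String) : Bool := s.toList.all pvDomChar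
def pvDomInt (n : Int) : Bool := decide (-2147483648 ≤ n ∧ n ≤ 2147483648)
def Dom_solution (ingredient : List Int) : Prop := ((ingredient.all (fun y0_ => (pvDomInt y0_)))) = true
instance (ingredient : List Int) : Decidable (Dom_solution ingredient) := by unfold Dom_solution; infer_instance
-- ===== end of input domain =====

-- B replaces A's per-element state machine (selective pushes, whole-stack clears) by the
-- canonical blind-push stack reduction with a top-4 window check; objective: simpler.
-- Stacks are stored top-at-head (Python's d[-1] / append / pop act on the list head here).

-- ===== PORT A =====
-- one loop iteration of A ('prev' in A is never used and is dropped)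
def stepA (s : Int × List Int) (elm : Int) : Int × List Int :=
  let answer := s.1
  let d := s.2
  if elm = 1 then
    if d.length = 0 then (answer, elm :: d)
    else
      if d.head? = some 3 then (answer + 1, d.drop 3)  -- three pops
      else (answer, elm :: d)
  else
    if d.length = 0 then (answer, d)                    -- continue
    else if elm = 2 then
      if d.head? = some 1 then (answer, elm :: d) else (answer, [])  -- clear stack
    else if elm = 3 then
      if d.head? = some 2 then (answer, elm :: d) else (answer, [])  -- clear stack
    else (answer, d)                                    -- no branch taken

def solution (ingredient : List Int) : Int :=
  (ingredient.foldl stepA (0, [])).1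

-- ===== PORT B =====
-- one loop iteration of B; stack[-4:] == [1,2,3,1] is take 4 = [1,3,2,1] top-at-head
def stepB (s : Int × List Int) (x : Int) : Int × List Int :=
  let count := s.1
  let stack := s.2
  if x = 1 ∨ x = 2 ∨ x = 3 then
    let stack' := x :: stack
    if stack'.take 4 = [1, 3, 2, 1] then (count + 1, stack'.drop 4)
    else (count, stack')
  else (count, stack)

def solution_alt (ingredient : List Int) : Int :=
  (ingredient.foldl stepB (0, [])).1

-- ===== PRECONDITION & SPEC =====
def Spec_solution (ingredient : List Int) (out : Int) : Prop := out = solution_alt ingredient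
instance (ingredient : List Int) (out : Int) : Decidable (Spec_solution ingredient out) := by unfold Spec_solution; infer_instance

-- ===== CLAIM (what is proved, stated in full; the proofs are below) =====
def Claim_equal_solution : Prop := ∀ (ingredient : List Int), Dom_solution ingredient → Spec_solution ingredient (solution ingredient)

-- ===== LEMMAS AND PROOFS =====

-- allowed adjacency in A's stack (x directly on top of y)
def pOk (x y : Int) : Prop :=
  (x = 1 ∧ (y = 1 ∨ y = 2)) ∨ (x = 2 ∧ y = 1) ∨ (x = 3 ∧ y = 2)

-- invariant shape of A's stack (top at head): adjacencies allowed, bottom element is 1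
def good : List Int → Prop
  | [] => True
  | [x] => x = 1
  | x :: y :: r => pOk x y ∧ good (y :: r)

-- invariant for the garbage segment below A's stack inside B's stack:
-- it can never contribute to completing a [1,2,3,1] window
def gok (g : List Int) : Prop :=
  g.head? ≠ some 1 ∧ g.take 2 ≠ [2, 1] ∧ g.take 3 ≠ [3, 2, 1]

lemma gok_nil : gok [] := by simp [gok]

lemma good_tail {x : Int} {l : List Int} (h : good (x :: l)) : good l := by
  cases l with
  | nil => trivial
  | cons y r => exact h.2

lemma good_head {y : Int} {r : List Int} (h : good (y :: r)) : y = 1 ∨ y = 2 ∨ y = 3 := by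
  cases r with
  | nil => exact Or.inl h
  | cons z r2 =>
    rcases h.1 with ⟨h1, _⟩ | ⟨h1, _⟩ | ⟨h1, _⟩
    · exact Or.inl h1
    · exact Or.inr (Or.inl h1)
    · exact Or.inr (Or.inr h1)

lemma good_three {r : List Int} (h : good (3 :: r)) : ∃ r3, r = 2 :: 1 :: r3 ∧ good r3 := by
  cases r with
  | nil => exact absurd h (by norm_num [good])
  | cons y r2 =>
    have hy : y = 2 := by rcases h.1 with ⟨h1, _⟩ | ⟨h1, _⟩ | ⟨_, h2⟩ <;> omega
    subst hy
    have h2 : good (2 :: r2) := h.2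
    cases r2 with
    | nil => exact absurd h2 (by norm_num [good])
    | cons z r3 =>
      have hz : z = 1 := by rcases h2.1 with ⟨h1, _⟩ | ⟨_, h1⟩ | ⟨h1, _⟩ <;> omega
      subst hz
      exact ⟨r3, rfl, good_tail h2.2⟩

-- one-step simulation: B's step on (a, d ++ g) mirrors A's step on (a, d),
-- preserving the count, the decomposition, and both invariants
lemma step_sim (a : Int) (d g : List Int) (x : Int) (hd : good d) (hg : gok g) :
    ∃ b d' g', stepA (a, d) x = (b, d') ∧ stepB (a, d ++ g) x = (b, d' ++ g') ∧
      good d' ∧ gok g' := by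
  obtain ⟨hg1, hg2, hg3⟩ := hg
  cases d with
  | nil =>
    by_cases hx1 : x = 1
    · subst hx1
      refine ⟨a, [1], g, by simp [stepA], ?_, by norm_num [good], hg1, hg2, hg3⟩
      simp [stepB, List.take_succ_cons, hg3]
    · by_cases hx2 : x = 2
      · subst hx2
        refine ⟨a, [], 2 :: g, by simp [stepA], by simp [stepB], trivial, ?_⟩
        refine ⟨by simp, ?_, by simp [List.take]⟩
        cases g with
        | nil => simp
        | cons b0 g0 => simp_all [List.take]
      · by_cases hx3 : x = 3
        · subst hx3
          refine ⟨a, [], 3 :: g, by simp [stepA], by simp [stepB], trivial, ?_⟩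
          refine ⟨by simp, by simp [List.take], ?_⟩
          cases g with
          | nil => simp
          | cons b0 g0 =>
            cases g0 with
            | nil => simp [List.take]
            | cons b1 g1 => simp_all [List.take]
        · exact ⟨a, [], g, by simp [stepA, hx1], by simp [stepB, hx1, hx2, hx3],
            trivial, hg1, hg2, hg3⟩
  | cons y r =>
    have hy123 : y = 1 ∨ y = 2 ∨ y = 3 := good_head hd
    by_cases hx1 : x = 1
    · subst hx1
      by_cases hy3 : y = 3
      · subst hy3
        obtain ⟨r3, hr, hr3⟩ := good_three hd
        subst hr
        exact ⟨a + 1, r3, g, by simp [stepA], by simp [stepB, List.take, List.drop], hr3,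
          hg1, hg2, hg3⟩
      · refine ⟨a, 1 :: y :: r, g, by simp [stepA, hy3], by simp [stepB, List.take, hy3],
          ⟨Or.inl ⟨rfl, by omega⟩, hd⟩, hg1, hg2, hg3⟩
    · by_cases hx2 : x = 2
      · subst hx2
        by_cases hy1 : y = 1
        · subst hy1
          refine ⟨a, 2 :: 1 :: r, g, by simp [stepA], ?_, ⟨by simp [pOk], hd⟩, hg1, hg2, hg3⟩
          simp [stepB, List.take]
        · refine ⟨a, [], 2 :: y :: r ++ g, by simp [stepA, hy1], ?_, trivial, ?_⟩
          · simp [stepB, List.take]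
          · exact ⟨by simp, by simp [List.take, hy1], by simp [List.take]⟩
      · by_cases hx3 : x = 3
        · subst hx3
          by_cases hy2 : y = 2
          · subst hy2
            refine ⟨a, 3 :: 2 :: r, g, by simp [stepA], ?_, ⟨by simp [pOk], hd⟩, hg1, hg2, hg3⟩
            simp [stepB, List.take]
          · refine ⟨a, [], 3 :: y :: r ++ g, by simp [stepA, hy2], ?_, trivial, ?_⟩
            · simp [stepB, List.take]
            · refine ⟨by simp, by simp [List.take], ?_⟩
              simp [List.take, hy2]
        · exact ⟨a, y :: r, g, by simp [stepA, hx1, hx2, hx3], by simp [stepB, hx1, hx2, hx3],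
            hd, hg1, hg2, hg3⟩

lemma fold_sim (L : List Int) : ∀ (a : Int) (d g : List Int), good d → gok g →
    (L.foldl stepB (a, d ++ g)).1 = (L.foldl stepA (a, d)).1 := by
  induction L with
  | nil => intro a d g _ _; rfl
  | cons x L ih =>
    intro a d g hd hg
    obtain ⟨b, d', g', hA, hB, hd', hg'⟩ := step_sim a d g x hd hg
    rw [List.foldl_cons, List.foldl_cons, hA, hB]
    exact ih b d' g' hd' hg'

-- ===== VERDICT (by name: the statement is the Claim_ definition above) =====
theorem solution_spec : Claim_equal_solution := by
  intro ingredient _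
  unfold Spec_solution solution solution_alt
  exact (fold_sim ingredient 0 [] [] trivial gok_nil).symm
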